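-- pv_equiv track=rewrite | github.com/TUM-DAML/seml | src/seml/experiment/config.py | invert_config
-- ===== SOURCE A (Python) =====
-- RESERVED_KEYS = ['grid', 'fixed', 'random']
--
-- def invert_config(config: dict):
--     reserved_sets = [(k, set(config.get(k, {}).keys())) for k in RESERVED_KEYS]
--     inverted_config = {}
--     for k, params in reserved_sets:
--         for p in params:
--             L = inverted_config.get(p, [])
--             L.append(k)
--             inverted_config[p] = L
--     return inverted_config
-- ===== SOURCE B (Python) =====
-- RESERVED_KEYS = ['grid', 'fixed', 'random']
--
-- def invert_config(config: dict):
--     sets = {k: set(config.get(k, {}).keys()) for k in RESERVED_KEYS}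
--     all_params = set().union(*sets.values())
--     return {p: [k for k in RESERVED_KEYS if p in sets[k]] for p in all_params}
-- ===== Notes on version B (the rewrite author's own statement) =====
-- stated objective: idiomatic
-- what changed: Instead of an outer-key/inner-param append loop mutating a dict, B first builds a key->param-set index and the union of all parameter names, then produces the result in one dict comprehension driven per parameter by membership tests.
import Mathlib
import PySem

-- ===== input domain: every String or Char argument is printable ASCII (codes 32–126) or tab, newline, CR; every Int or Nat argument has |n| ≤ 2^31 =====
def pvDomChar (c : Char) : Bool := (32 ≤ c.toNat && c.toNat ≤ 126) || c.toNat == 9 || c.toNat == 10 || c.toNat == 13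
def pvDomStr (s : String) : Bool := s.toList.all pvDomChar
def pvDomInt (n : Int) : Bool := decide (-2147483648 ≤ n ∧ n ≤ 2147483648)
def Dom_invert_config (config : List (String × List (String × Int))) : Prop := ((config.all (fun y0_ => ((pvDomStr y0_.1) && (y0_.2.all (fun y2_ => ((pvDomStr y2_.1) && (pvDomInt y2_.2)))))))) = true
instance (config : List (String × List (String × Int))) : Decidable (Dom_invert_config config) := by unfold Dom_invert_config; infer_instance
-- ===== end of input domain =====

-- B replaces A's outer-key/inner-param dict-mutating append loop by a key→param-set
-- index plus one per-parameter comprehension with membership tests (idiomatic; same cost).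

def RESERVED_KEYS : List String := ["grid", "fixed", "random"]

-- ===== PORT A =====
def invert_config (config : List (String × List (String × Int))) : List (String × List String) :=
  let reserved_sets : List (String × PySem.Set String) :=
    RESERVED_KEYS.map (fun k => (k, PySem.Set.ofList (((PySem.Dict.mk config).getD k []).map Prod.fst)))
  let inverted_config : PySem.Dict String (List String) :=
    reserved_sets.foldl (fun d kp =>
      kp.2.foldl (fun d p => d.insert p ((d.getD p []) ++ [kp.1])) d) (PySem.Dict.mk [])
  inverted_config.items

-- ===== PORT B =====
def invert_config_alt (config : List (String × List (String × Int))) : List (String × List String) :=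
  let sets : PySem.Dict String (PySem.Set String) :=
    RESERVED_KEYS.foldl (fun d k =>
      d.insert k (PySem.Set.ofList (((PySem.Dict.mk config).getD k []).map Prod.fst))) (PySem.Dict.mk [])
  let all_params : PySem.Set String :=
    sets.values.foldl (fun s t => PySem.Set.union s t) PySem.Set.empty
  all_params.map (fun p =>
    (p, RESERVED_KEYS.filter (fun k => PySem.Set.contains (sets.getD k PySem.Set.empty) p)))

-- ===== PRECONDITION & SPEC =====
def Spec_invert_config (config : List (String × List (String × Int))) (out : List (String × List String)) : Prop := out = invert_config_alt config
instance (config : List (String × List (String × Int))) (out : List (String × List String)) : Decidable (Spec_invert_config config out) := by unfold Spec_invert_config; infer_instance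

-- ===== CLAIM (what is proved, stated in full; the proofs are below) =====
def Claim_equal_invert_config : Prop := ∀ (config : List (String × List (String × Int))), Dom_invert_config config → Spec_invert_config config (invert_config config)

-- ===== LEMMAS AND PROOFS =====

-- Effect of A's inner loop ('for p in params: … append k …') on the dict's items:
-- keys already present that occur in ps get k appended; fresh members of ps append (p, [k]).
lemma inner_fold (k : String) (ps : List String) (hps : ps.Nodup)
    (d : PySem.Dict String (List String)) (hd : d.keys.Nodup) :
    (ps.foldl (fun d p => d.insert p ((d.getD p []) ++ [k])) d).items
      = d.items.map (fun qv => if qv.1 ∈ ps then (qv.1, qv.2 ++ [k]) else qv)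
        ++ (ps.filter (fun p => !(d.contains p))).map (fun p => (p, ([k] : List String))) := by
  induction ps generalizing d with
  | nil => simp
  | cons p ps ih =>
    obtain ⟨hp, hps⟩ := List.nodup_cons.mp hps
    rw [List.foldl_cons, ih hps _ (PySem.Dict.nodup_keys_insert _ _ _ hd)]
    have hfilt : ps.filter (fun q => !((d.insert p (d.getD p [] ++ [k])).contains q))
        = ps.filter (fun q => !(d.contains q)) := by
      apply List.filter_congr
      intro q hq
      have hqp : q ≠ p := fun h => hp (h ▸ hq)
      simp [PySem.Dict.contains_insert, hqp]
    rw [hfilt]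
    by_cases hc : d.contains p = true
    · rw [PySem.Dict.items_insert_of_contains _ _ hc]
      rw [List.map_map]
      have hmap : ∀ qv ∈ d.items,
          ((fun qv => if qv.1 ∈ ps then (qv.1, qv.2 ++ [k]) else qv) ∘
            (fun q => if (q.1 == p) = true then (p, d.getD p [] ++ [k]) else q)) qv
          = (fun qv => if qv.1 ∈ p :: ps then (qv.1, qv.2 ++ [k]) else qv) qv := by
        intro qv hqv
        by_cases hqp : qv.1 = p
        · have hv : d.getD qv.1 [] = qv.2 :=
            PySem.Dict.getD_of_mem_items d (by exact (Prod.mk.eta ▸ hqv)) hd []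
          simp [Function.comp, hqp, hp, ← hv]
        · simp [Function.comp, hqp, List.mem_cons]
      rw [List.map_congr_left hmap]
      simp [hc]
    · have hc' : d.contains p = false := by simpa using hc
      rw [PySem.Dict.items_insert_of_not_contains _ _ hc']
      rw [PySem.Dict.getD_of_not_contains _ _ hc']
      rw [List.map_append]
      have hmap : ∀ qv ∈ d.items,
          (fun qv => if qv.1 ∈ ps then (qv.1, qv.2 ++ [k]) else qv) qv
          = (fun qv => if qv.1 ∈ p :: ps then (qv.1, qv.2 ++ [k]) else qv) qv := by
        intro qv hqv
        have hqp : qv.1 ≠ p := by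
          intro h
          have : d.contains qv.1 = true := by
            simp [PySem.Dict.contains]
            exact ⟨qv.2, by simpa using hqv⟩
          rw [h] at this; rw [this] at hc'; exact absurd hc' (by simp)
        simp [hqp, List.mem_cons]
      rw [List.map_congr_left hmap]
      simp [hc', hp, List.append_assoc]

-- set.union appends the new elements of its (duplicate-free) second operand
lemma union_filter (S : List String) (hS : S.Nodup) (U : PySem.Set String) :
    PySem.Set.union U S = U ++ S.filter (fun p => !(U.contains p)) := by
  induction S generalizing U with
  | nil => simp [PySem.Set.union, PySem.Set.update]
  | cons p S ih =>
    obtain ⟨hp, hS⟩ := List.nodup_cons.mp hS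
    have hstep : PySem.Set.union U (p :: S) = PySem.Set.union (PySem.Set.add U p) S := rfl
    rw [hstep, ih hS]
    by_cases hmem : p ∈ U
    · rw [PySem.Set.add_of_mem hmem]
      simp [hmem]
    · rw [PySem.Set.add_of_not_mem hmem]
      have : S.filter (fun q => !((U ++ [p]).contains q)) = S.filter (fun q => !(U.contains q)) := by
        apply List.filter_congr
        intro q hq
        have : q ≠ p := fun h => hp (h ▸ hq)
        simp [this]
      rw [this]
      simp [hmem]

-- ===== VERDICT (by name: the statement is the Claim_ definition above) =====
theorem invert_config_spec : Claim_equal_invert_config := by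
  intro config _
  unfold Spec_invert_config
  unfold invert_config invert_config_alt
  simp only [RESERVED_KEYS, List.map_cons, List.map_nil, List.foldl_cons, List.foldl_nil]
  set Sg := PySem.Set.ofList (((PySem.Dict.mk config).getD "grid" []).map Prod.fst) with hSg
  set Sf := PySem.Set.ofList (((PySem.Dict.mk config).getD "fixed" []).map Prod.fst) with hSf
  set Sr := PySem.Set.ofList (((PySem.Dict.mk config).getD "random" []).map Prod.fst) with hSr
  have hg : Sg.Nodup := hSg ▸ PySem.Set.nodup_ofList _
  have hf : Sf.Nodup := hSf ▸ PySem.Set.nodup_ofList _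
  have hr : Sr.Nodup := hSr ▸ PySem.Set.nodup_ofList _
  clear_value Sg Sf Sr
  clear hSg hSf hSr
  -- B side: reduce the literal 3-key dict
  have hdict : (({ items := [] } : PySem.Dict String (PySem.Set String)).insert "grid" Sg
        |>.insert "fixed" Sf |>.insert "random" Sr)
      = PySem.Dict.mk [("grid",Sg),("fixed",Sf),("random",Sr)] := rfl
  rw [hdict]
  have hvals : (PySem.Dict.mk [("grid",Sg),("fixed",Sf),("random",Sr)]).values = [Sg,Sf,Sr] := rfl
  rw [hvals]
  have hgetg : (PySem.Dict.mk [("grid",Sg),("fixed",Sf),("random",Sr)]).getD "grid" PySem.Set.empty = Sg := rfl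
  have hgetf : (PySem.Dict.mk [("grid",Sg),("fixed",Sf),("random",Sr)]).getD "fixed" PySem.Set.empty = Sf := rfl
  have hgetr : (PySem.Dict.mk [("grid",Sg),("fixed",Sf),("random",Sr)]).getD "random" PySem.Set.empty = Sr := rfl
  simp only [List.foldl_cons, List.foldl_nil, List.filter_cons, List.filter_nil,
    hgetg, hgetf, hgetr]
  -- B side unions
  rw [show (PySem.Set.empty.union Sg) = Sg by
        rw [union_filter Sg hg]; simp [PySem.Set.empty]]
  rw [union_filter Sf hf Sg, union_filter Sr hr]
  set Sf' := Sf.filter (fun p => !(Sg.contains p)) with hSf'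
  set Sr' := Sr.filter (fun p => !((Sg ++ Sf').contains p)) with hSr'
  -- A side, step 1
  have hk0 : ({ items := [] } : PySem.Dict String (List String)).keys.Nodup := by
    simp [PySem.Dict.keys]
  have h1 : (List.foldl (fun d p => d.insert p (d.getD p [] ++ ["grid"])) ({ items := [] } : PySem.Dict String (List String)) Sg).items
      = Sg.map (fun p => (p, (["grid"] : List String))) := by
    rw [inner_fold "grid" Sg hg _ hk0]
    simp [PySem.Dict.contains]
  have hk1 : (List.foldl (fun d p => d.insert p (d.getD p [] ++ ["grid"])) ({ items := [] } : PySem.Dict String (List String)) Sg).keys = Sg := by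
    simp [PySem.Dict.keys, h1, Function.comp_def]
  have hc1 : ∀ q, (List.foldl (fun d p => d.insert p (d.getD p [] ++ ["grid"])) ({ items := [] } : PySem.Dict String (List String)) Sg).contains q
      = Sg.contains q := by
    intro q
    simp [PySem.Dict.contains, h1, List.any_map, Function.comp_def, List.any_beq']
  -- A side, step 2
  have h2 : (List.foldl (fun d p => d.insert p (d.getD p [] ++ ["fixed"]))
        (List.foldl (fun d p => d.insert p (d.getD p [] ++ ["grid"])) ({ items := [] } : PySem.Dict String (List String)) Sg) Sf).items
      = Sg.map (fun p => (p, if p ∈ Sf then (["grid","fixed"] : List String) else ["grid"]))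
        ++ Sf'.map (fun p => (p, (["fixed"] : List String))) := by
    rw [inner_fold "fixed" Sf hf _ (by rw [hk1]; exact hg), h1]
    congr 1
    · rw [List.map_map]
      apply List.map_congr_left
      intro p hp
      by_cases hpf : p ∈ Sf <;> simp [hpf]
    · congr 1
      apply List.filter_congr
      intro q hq
      rw [hc1 q]
  have hk2 : (List.foldl (fun d p => d.insert p (d.getD p [] ++ ["fixed"]))
        (List.foldl (fun d p => d.insert p (d.getD p [] ++ ["grid"])) ({ items := [] } : PySem.Dict String (List String)) Sg) Sf).keys
      = Sg ++ Sf' := by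
    simp [PySem.Dict.keys, h2, List.map_map, Function.comp_def]
  have hknd2 : (Sg ++ Sf').Nodup := by
    refine List.Nodup.append hg (hf.filter _) ?_
    intro q hq hq'
    rw [hSf'] at hq'
    simp only [List.mem_filter] at hq'
    simp_all
  have hc2 : ∀ q, (List.foldl (fun d p => d.insert p (d.getD p [] ++ ["fixed"]))
        (List.foldl (fun d p => d.insert p (d.getD p [] ++ ["grid"])) ({ items := [] } : PySem.Dict String (List String)) Sg) Sf).contains q
      = (Sg ++ Sf').contains q := by
    intro q
    simp [PySem.Dict.contains, h2, List.any_map, List.any_append, Function.comp_def, List.any_beq']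
  -- A side, step 3
  rw [inner_fold "random" Sr hr _ (by rw [hk2]; exact hknd2), h2]
  rw [show Sr.filter (fun p => !((List.foldl (fun d p => d.insert p (d.getD p [] ++ ["fixed"]))
        (List.foldl (fun d p => d.insert p (d.getD p [] ++ ["grid"])) ({ items := [] } : PySem.Dict String (List String)) Sg) Sf).contains p)) = Sr'
      from by rw [hSr']; exact List.filter_congr (fun q hq => by rw [hc2 q])]
  -- assemble
  simp only [List.map_append, List.map_map]
  congr 1
  · congr 1
    · apply List.map_congr_left
      intro p hp
      by_cases hpf : p ∈ Sf <;> by_cases hpr : p ∈ Sr <;>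
        simp [hp, hpf, hpr]
    · apply List.map_congr_left
      intro p hp
      rw [hSf', List.mem_filter] at hp
      have hpf : p ∈ Sf := hp.1
      have hpg : p ∉ Sg := by simpa using hp.2
      by_cases hpr : p ∈ Sr <;> simp [hpf, hpg, hpr]
  · apply List.map_congr_left
    intro p hp
    rw [hSr', List.mem_filter] at hp
    have hno : p ∉ Sg ∧ p ∉ Sf' := by simpa [not_or] using hp.2
    have hpf : p ∉ Sf := by
      intro h
      exact hno.2 (by rw [hSf']; simp [List.mem_filter, h, hno.1])
    simp [hno.1, hpf, hp.1]
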